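-- pv_equiv track=rewrite | github.com/allexandre97/phd-scripts | FAST_LPS_JCTC/graph_avneigh.py | GenSubsamples
-- ===== SOURCE A (Python) =====
-- def GenSubsamples(DATA, sepindex):
--
--     out    = []
--     checks = []
--
--     idx0 = 0
--
--     while len(checks) < len(DATA):
--
--         subsample = []
--         i = idx0
--         while i < len(DATA):
--
--             subsample.append(DATA[i])
--             checks.append(i)
--             i += sepindex
--
--         out.append(subsample)
--         idx0 += 1
--
--     return out
-- ===== SOURCE B (Python) =====
-- def GenSubsamples(DATA, sepindex):
--     buckets = [[] for _ in range(min(sepindex, len(DATA)))]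
--     for i in range(len(DATA)):
--         buckets[i % sepindex].append(DATA[i])
--     return buckets
-- ===== Notes on version B (the rewrite author's own statement) =====
-- stated objective: simpler
-- what changed: Replaced the offset/stride nested while-loops (with their O(n) 'checks' bookkeeping list that is re-measured to decide termination) by one linear pass that appends DATA[i] to bucket i % sepindex over min(sepindex, len(DATA)) preallocated buckets.
import Mathlib
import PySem

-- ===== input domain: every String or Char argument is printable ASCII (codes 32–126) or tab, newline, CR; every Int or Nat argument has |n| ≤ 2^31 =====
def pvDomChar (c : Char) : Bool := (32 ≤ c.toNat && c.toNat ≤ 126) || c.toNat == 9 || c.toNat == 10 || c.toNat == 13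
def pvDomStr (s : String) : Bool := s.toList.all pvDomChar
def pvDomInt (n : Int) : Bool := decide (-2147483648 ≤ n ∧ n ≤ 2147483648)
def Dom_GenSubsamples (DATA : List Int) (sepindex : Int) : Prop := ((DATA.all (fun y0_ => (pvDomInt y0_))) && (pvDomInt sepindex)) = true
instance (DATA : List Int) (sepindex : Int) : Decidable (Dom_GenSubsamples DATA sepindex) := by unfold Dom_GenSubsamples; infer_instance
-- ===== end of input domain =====

-- B replaces A's offset/stride nested while-loops (with their O(n) 'checks' bookkeeping list)
-- by a single pass that drops each element into bucket i % sepindex ('simpler' objective).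

-- ===== PORT A =====
-- Inner while loop of A: append DATA[i]; checks.append(i); i += sepindex, while i < len(DATA).
-- The fuel argument only makes the loop total: fuel = DATA.length suffices whenever sepindex ≥ 1
-- (each iteration increases i by at least 1). DATA[i] is read with pyGetD: exact because the
-- guard gives i < len and, under Pre_, i starts at idx0 ≥ 0 and only increases.
def innerA (DATA : List Int) (sepindex : Int) :
    Nat → Int → List Int → List Int → List Int × List Int
  | 0, _, subsample, checks => (subsample, checks)
  | fuel + 1, i, subsample, checks =>
    if i < (DATA.length : Int) then
      innerA DATA sepindex fuel (i + sepindex)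
        (subsample ++ [PySem.List.pyGetD DATA i 0]) (checks ++ [i])
    else (subsample, checks)

-- Outer while loop of A: while len(checks) < len(DATA). Fuel DATA.length + 1 suffices under
-- Pre_ (each entered round appends at least one index to checks).
def outerA (DATA : List Int) (sepindex : Int) :
    Nat → Int → List Int → List (List Int) → List (List Int)
  | 0, _, _, out => out
  | fuel + 1, idx0, checks, out =>
    if (checks.length : Int) < (DATA.length : Int) then
      let r := innerA DATA sepindex DATA.length idx0 [] checks
      outerA DATA sepindex fuel (idx0 + 1) r.2 (out ++ [r.1])
    else out

def GenSubsamples (DATA : List Int) (sepindex : Int) : List (List Int) :=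
  outerA DATA sepindex (DATA.length + 1) 0 [] []

-- ===== PORT B =====
-- Source B: buckets = [[] for _ in range(min(sepindex, len(DATA)))]; for i in range(len(DATA)):
-- buckets[i % sepindex].append(DATA[i]); return buckets.
-- Under Pre_ (sepindex ≥ 1) Python's i % sepindex on the Nat index i equals i % sepindex.toNat.
def GenSubsamples_alt (DATA : List Int) (sepindex : Int) : List (List Int) :=
  let buckets0 : List (List Int) :=
    (List.range (min sepindex (DATA.length : Int)).toNat).map (fun _ => [])
  (List.range DATA.length).foldl
    (fun bs i => bs.modify (i % sepindex.toNat)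
      (fun b => b ++ [PySem.List.pyGetD DATA (i : Int) 0])) buckets0

-- ===== PRECONDITION & SPEC =====
-- Pre_ excludes sepindex ≤ 0 with nonempty DATA: there A never returns (the while loops run
-- forever for sepindex = 0, and for sepindex < 0 the inner loop walks i below -len and raises
-- IndexError); B raises ZeroDivisionError / IndexError there.
def Pre_GenSubsamples (DATA : List Int) (sepindex : Int) : Prop :=
  DATA = [] ∨ 1 ≤ sepindex
instance (DATA : List Int) (sepindex : Int) : Decidable (Pre_GenSubsamples DATA sepindex) := by
  unfold Pre_GenSubsamples; infer_instance

def pvWitness_GenSubsamples : List Int × Int := ([10, 20, 30, 40, 50], 2)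

def Spec_GenSubsamples (DATA : List Int) (sepindex : Int) (out : List (List Int)) : Prop := out = GenSubsamples_alt DATA sepindex
instance (DATA : List Int) (sepindex : Int) (out : List (List Int)) : Decidable (Spec_GenSubsamples DATA sepindex out) := by unfold Spec_GenSubsamples; infer_instance

-- ===== CLAIM (what is proved, stated in full; the proofs are below) =====
def Claim_equal_GenSubsamples : Prop := ∀ (DATA : List Int) (sepindex : Int), Dom_GenSubsamples DATA sepindex → Pre_GenSubsamples DATA sepindex → Spec_GenSubsamples DATA sepindex (GenSubsamples DATA sepindex)

-- ===== LEMMAS AND PROOFS =====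

-- The strided index list i, i+s, i+2s, … below len (the indices A's inner loop visits).
def natIdxs (len s i : Nat) : List Nat :=
  if _h : i < len ∧ 1 ≤ s then i :: natIdxs len s (i + s) else []
termination_by len - i
decreasing_by omega

theorem natIdxs_nil {len s i : Nat} (h : len ≤ i) : natIdxs len s i = [] := by
  rw [natIdxs]; simp; omega

theorem natIdxs_cons {len s i : Nat} (h1 : i < len) (h2 : 1 ≤ s) :
    natIdxs len s i = i :: natIdxs len s (i + s) := by
  rw [natIdxs, dif_pos ⟨h1, h2⟩]

-- A's inner loop computes the strided subsample and appends the visited indices to checks.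
theorem innerA_eq (DATA : List Int) (s : Int) (hs : 1 ≤ s) :
    ∀ (fuel n : Nat), DATA.length - n ≤ fuel → ∀ (sub checks : List Int),
    innerA DATA s fuel (n : Int) sub checks =
      (sub ++ (natIdxs DATA.length s.toNat n).map (fun j => DATA.getD j 0),
       checks ++ (natIdxs DATA.length s.toNat n).map (fun j => (j : Int))) := by
  intro fuel
  induction fuel with
  | zero =>
    intro n h sub checks
    rw [natIdxs_nil (by omega)]
    simp [innerA]
  | succ f ih =>
    intro n h sub checks
    by_cases hn : n < DATA.length
    · rw [innerA]
      rw [if_pos (by exact_mod_cast hn)]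
      have hcast : (n : Int) + s = ((n + s.toNat : Nat) : Int) := by
        push_cast; omega
      rw [hcast, ih (n + s.toNat) (by omega)]
      rw [natIdxs_cons hn (show 1 ≤ s.toNat by omega)]
      simp only [List.map_cons, PySem.List.pyGetD_natCast, List.append_assoc,
        List.cons_append, List.nil_append]
      rfl
    · rw [innerA, if_neg (by exact_mod_cast hn), natIdxs_nil (by omega)]
      simp

-- Number of indices below len whose residue class mod s is below k (= len(checks) after k rounds).
def cnt (len s k : Nat) : Nat := List.countP (fun j => j % s < k) (List.range len)

theorem countP_mod_split (s k : Nat) (l : List Nat) :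
    List.countP (fun j => j % s < k + 1) l =
      List.countP (fun j => j % s < k) l + List.countP (fun j => j % s == k) l := by
  induction l with
  | nil => simp
  | cons a l ih =>
    simp only [List.countP_cons, ih]
    by_cases h1 : a % s < k
    · have h2 : a % s < k + 1 := by omega
      have h3 : ¬ a % s = k := by omega
      simp [h1, h2, h3]
      omega
    · by_cases h2 : a % s = k
      · simp [h2]
        omega
      · have h3 : ¬ a % s < k + 1 := by omega
        simp [h1, h2, h3]

-- One step of the strided list when the upper bound grows by one.
theorem natIdxs_snoc (len s : Nat) (hs : 1 ≤ s) :
    ∀ m i, len + 1 - i ≤ m →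
      natIdxs (len + 1) s i =
        natIdxs len s i ++ (if len % s = i % s ∧ i ≤ len then [len] else []) := by
  intro m
  induction m with
  | zero =>
    intro i h
    rw [natIdxs_nil (by omega), natIdxs_nil (by omega), if_neg (by omega)]
    simp
  | succ m ih =>
    intro i h
    by_cases h1 : len + 1 ≤ i
    · rw [natIdxs_nil (by omega), natIdxs_nil (by omega), if_neg (by omega)]
      simp
    · by_cases h2 : i = len
      · subst h2
        rw [natIdxs, dif_pos ⟨by omega, hs⟩, natIdxs_nil (by omega),
            natIdxs_nil (by omega), if_pos ⟨rfl, le_refl _⟩]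
        simp
      · have hi : i < len := by omega
        rw [natIdxs_cons (show i < len + 1 by omega) hs, natIdxs_cons hi hs,
            ih (i + s) (by omega)]
        have hmod : (i + s) % s = i % s := Nat.add_mod_right i s
        by_cases hc : len % s = i % s
        · -- the next multiple i + s still fits below len + 1
          have hstep : i + s ≤ len := by
            have e1 := Nat.div_add_mod i s
            have e2 := Nat.div_add_mod len s
            have hdiv : i / s < len / s := by
              by_contra hcon
              have : len / s ≤ i / s := by omega
              have : s * (len / s) ≤ s * (i / s) := Nat.mul_le_mul_left s this
              omega
            have : s * (i / s + 1) ≤ s * (len / s) := Nat.mul_le_mul_left s (by omega)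
            have : s * (i / s + 1) = s * (i / s) + s := by ring
            omega
          rw [if_pos (show len % s = (i + s) % s ∧ i + s ≤ len from
                ⟨by rw [hmod]; exact hc, hstep⟩),
              if_pos (show len % s = i % s ∧ i ≤ len from ⟨hc, by omega⟩)]
          simp
        · rw [if_neg (show ¬ (len % s = (i + s) % s ∧ i + s ≤ len) by rw [hmod]; tauto),
              if_neg (show ¬ (len % s = i % s ∧ i ≤ len) by tauto)]
          simp
  
-- The strided list starting at r < s is the filter of range len by residue class r.
theorem natIdxs_eq_filter (s : Nat) (hs : 1 ≤ s) (r : Nat) (hr : r < s) :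
    ∀ len, natIdxs len s r = (List.range len).filter (fun j => j % s == r) := by
  intro len
  induction len with
  | zero => rw [natIdxs_nil (by omega)]; simp
  | succ n ih =>
    rw [natIdxs_snoc n s hs (n + 1) r (by omega), ih, List.range_succ,
        List.filter_append]
    congr 1
    by_cases hc : n % s = r
    · rw [if_pos ⟨by rw [hc, Nat.mod_eq_of_lt hr], by have := Nat.mod_le n s; omega⟩]
      simp [hc]
    · rw [if_neg (by rw [Nat.mod_eq_of_lt hr]; omega)]
      simp [hc]

theorem length_natIdxs (len s r : Nat) (hs : 1 ≤ s) (hr : r < s) :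
    (natIdxs len s r).length = List.countP (fun j => j % s == r) (List.range len) := by
  rw [natIdxs_eq_filter s hs r hr, ← List.countP_eq_length_filter]

theorem cnt_zero (len s : Nat) : cnt len s 0 = 0 := by
  simp [cnt]

theorem cnt_succ (len s k : Nat) :
    cnt len s (k + 1) = cnt len s k + List.countP (fun j => j % s == k) (List.range len) := by
  unfold cnt; exact countP_mod_split s k (List.range len)

theorem cnt_lt (len s k : Nat) (hk : k < min s len) : cnt len s k < len := by
  have hle : cnt len s k ≤ len := by
    have := List.countP_le_length (p := fun j => j % s < k) (l := List.range len)
    simpa [cnt] using this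
  rcases Nat.lt_or_ge (cnt len s k) len with h | h
  · exact h
  · exfalso
    have heq : List.countP (fun j => decide (j % s < k)) (List.range len)
        = (List.range len).length := by
      rw [List.length_range]; simp only [cnt] at h hle; omega
    have hall := List.countP_eq_length.mp heq
    have hkmem : k ∈ List.range len := by simp; omega
    have := hall k hkmem
    rw [Nat.mod_eq_of_lt (by omega)] at this
    simp at this
  
theorem cnt_min (len s : Nat) (hs : 1 ≤ s) : cnt len s (min s len) = len := by
  have : List.countP (fun j => j % s < min s len) (List.range len) = (List.range len).length := by
    apply List.countP_eq_length.mpr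
    intro j hj
    rw [List.mem_range] at hj
    have h1 : j % s < s := Nat.mod_lt j (by omega)
    have h2 : j % s ≤ j := Nat.mod_le j s
    simp; omega
  simpa [cnt] using this

-- A's outer loop: starting at round k with checks.length = cnt k, the remaining rounds append
-- the strided subsamples for offsets k, k+1, …, min s len - 1.
theorem outerA_eq (DATA : List Int) (s : Int) (hs : 1 ≤ s) :
    ∀ (d k fuel : Nat) (checks : List Int) (out : List (List Int)),
      k + d = min s.toNat DATA.length →
      checks.length = cnt DATA.length s.toNat k →
      d + 1 ≤ fuel →
      outerA DATA s fuel (k : Int) checks out =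
        out ++ (List.range' k d).map
          (fun r => (natIdxs DATA.length s.toNat r).map (fun j => DATA.getD j 0)) := by
  intro d
  induction d with
  | zero =>
    intro k fuel checks out hk hc hf
    obtain ⟨f, rfl⟩ : ∃ f, fuel = f + 1 := ⟨fuel - 1, by omega⟩
    rw [outerA]
    rw [if_neg]
    · simp
    · have hm : k = min s.toNat DATA.length := by omega
      have : checks.length = DATA.length := by
        rw [hc, hm]; exact cnt_min DATA.length s.toNat (by omega)
      simp [this]
  | succ d ih =>
    intro k fuel checks out hk hc hf
    obtain ⟨f, rfl⟩ : ∃ f, fuel = f + 1 := ⟨fuel - 1, by omega⟩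
    have hkmin : k < min s.toNat DATA.length := by omega
    rw [outerA]
    rw [if_pos]
    · rw [innerA_eq DATA s hs DATA.length k (by omega) [] checks]
      have hlen : (checks ++ (natIdxs DATA.length s.toNat k).map (fun j => (j : Int))).length
          = cnt DATA.length s.toNat (k + 1) := by
        rw [cnt_succ]
        simp [hc, length_natIdxs DATA.length s.toNat k (by omega) (by omega)]
      have hcast : (k : Int) + 1 = ((k + 1 : Nat) : Int) := by push_cast; ring
      rw [hcast, ih (k + 1) f _ _ (by omega) hlen (by omega)]
      rw [List.range'_succ]
      simp
    · have := cnt_lt DATA.length s.toNat k hkmin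
      rw [hc] at *
      exact_mod_cast by omega
  
-- Characterisation of A for sepindex ≥ 1.
theorem A_char (DATA : List Int) (s : Int) (hs : 1 ≤ s) :
    GenSubsamples DATA s =
      (List.range (min s.toNat DATA.length)).map
        (fun r => (natIdxs DATA.length s.toNat r).map (fun j => DATA.getD j 0)) := by
  unfold GenSubsamples
  have h0 : (0 : Int) = ((0 : Nat) : Int) := rfl
  rw [h0, outerA_eq DATA s hs (min s.toNat DATA.length) 0 (DATA.length + 1) [] []
        (by omega) (by simp [cnt_zero]) (by omega)]
  simp [List.range_eq_range']

-- modify on a tabulated list is pointwise.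
theorem modify_map_range (G : Nat → List Int) (m idx : Nat) (F : List Int → List Int)
    (_h : idx < m) :
    ((List.range m).map G).modify idx F =
      (List.range m).map (fun r => if r = idx then F (G r) else G r) := by
  apply List.ext_getElem
  · simp
  · intro j h1 h2
    simp only [List.getElem_modify]
    simp only [List.length_map, List.length_range] at h1 h2
    simp [List.getElem_map, List.getElem_range]
    by_cases hj : idx = j
    · subst hj; simp
    · rw [if_neg hj, if_neg (Ne.symm hj)]

-- B's fold: after processing indices 0..n-1 into m buckets (all hit indices staying below m),
-- bucket r holds the class-r elements in order.
theorem fold_buckets (f : Nat → Int) (s' m : Nat) :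
    ∀ n : Nat, (∀ i, i < n → i % s' < m) →
      (List.range n).foldl
        (fun bs i => bs.modify (i % s') (fun b => b ++ [f i]))
        ((List.range m).map fun _ => ([] : List Int)) =
      (List.range m).map
        (fun r => ((List.range n).filter (fun j => j % s' == r)).map f) := by
  intro n
  induction n with
  | zero => intro _; simp
  | succ n ih =>
    intro hbound
    rw [List.range_succ, List.foldl_append, ih (fun i hi => hbound i (by omega))]
    simp only [List.foldl_cons, List.foldl_nil]
    rw [modify_map_range _ m (n % s') _ (hbound n (by omega))]
    apply List.map_congr_left
    intro r hr
    by_cases hc : r = n % s'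
    · subst hc
      rw [if_pos rfl, List.filter_append]
      simp
    · rw [if_neg hc, List.filter_append]
      have : ¬ (n % s' == r) = true := by simp; omega
      simp [this]

-- Characterisation of B for sepindex ≥ 1.
theorem B_char (DATA : List Int) (s : Int) (hs : 1 ≤ s) :
    GenSubsamples_alt DATA s =
      (List.range (min s.toNat DATA.length)).map
        (fun r => ((List.range DATA.length).filter (fun j => j % s.toNat == r)).map
          (fun j => DATA.getD j 0)) := by
  unfold GenSubsamples_alt
  simp only [PySem.List.pyGetD_natCast]
  have hm : (min s (DATA.length : Int)).toNat = min s.toNat DATA.length := by omega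
  rw [hm]
  apply fold_buckets
  intro i hi
  have h1 : i % s.toNat < s.toNat := Nat.mod_lt i (by omega)
  have h2 : i % s.toNat ≤ i := Nat.mod_le i s.toNat
  omega

-- Both ports return [] on empty DATA, for every sepindex.
theorem A_nil (s : Int) : GenSubsamples [] s = [] := by
  simp [GenSubsamples, outerA]

theorem B_nil (s : Int) : GenSubsamples_alt [] s = [] := by
  unfold GenSubsamples_alt
  simp

-- ===== VERDICT (by name: the statement is the Claim_ definition above) =====
theorem GenSubsamples_spec : Claim_equal_GenSubsamples := by
  unfold Claim_equal_GenSubsamples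
  intro DATA s _ hpre
  unfold Spec_GenSubsamples
  rcases hpre with h | hs
  · subst h; rw [A_nil, B_nil]
  · rw [A_char DATA s hs, B_char DATA s hs]
    apply List.map_congr_left
    intro r hr
    rw [List.mem_range] at hr
    rw [natIdxs_eq_filter s.toNat (by omega) r (by omega)]
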